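-- pv_equiv track=rewrite | github.com/lleene/pyviewer | imageloader.py | orderFileList
-- ===== SOURCE A (Python) =====
-- import math
--
-- def orderFileList(file_list, modulo=4, max_image_count=40):
--     for set in file_list:
--         set.sort()
--     set_size = [len(set) for set in file_list]
--     set_index = [modulo] * len(file_list)
--     ordered_list = list()
--     for index in range(
--         0,
--         min(
--             math.floor(sum(set_size) / modulo),
--             math.floor(max_image_count / modulo) - 1,
--         ),
--     ):
--         if set_index[index % len(set_size)] < set_size[index % len(set_size)]:
--             ordered_list.extend(
--                 file_list[index % len(set_size)][
--                     set_index[index % len(set_size)]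
--                     - modulo : set_index[index % len(set_size)]
--                 ]
--             )
--         else:
--             ordered_list.extend(
--                 file_list[index % len(set_size)][
--                     set_index[index % len(set_size)]
--                     - modulo : set_size[index % len(set_size)]
--                 ]
--             )
--         set_index[index % len(set_size)] += modulo
--     return ordered_list
-- ===== SOURCE B (Python) =====
-- def orderFileList(file_list, modulo=4, max_image_count=40):
--     for s in file_list:
--         s.sort()
--     total = sum(len(s) for s in file_list)
--     bound = min(total // modulo, max_image_count // modulo - 1)
--     if bound <= 0:
--         return []
--     n = len(file_list)
--     rounds = -(-bound // n)  # ceil(bound / n)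
--     chunk_rows = [[s[k * modulo:(k + 1) * modulo] for k in range(rounds)]
--                   for s in file_list]
--     interleaved = [chunk for column in zip(*chunk_rows) for chunk in column]
--     return [x for chunk in interleaved[:bound] for x in chunk]
-- ===== Notes on version B (the rewrite author's own statement) =====
-- stated objective: alternative
-- what changed: B replaces A's stateful round-robin loop (per-list set_index counters updated each iteration, with an if/else on chunk bounds) by a staged data-flow pipeline: split each sorted sublist into fixed-size chunk rows, transpose the rows with zip(*...) to interleave them, truncate to the chunk bound and flatten; like A it sorts the sublists in place.
import Mathlib
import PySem

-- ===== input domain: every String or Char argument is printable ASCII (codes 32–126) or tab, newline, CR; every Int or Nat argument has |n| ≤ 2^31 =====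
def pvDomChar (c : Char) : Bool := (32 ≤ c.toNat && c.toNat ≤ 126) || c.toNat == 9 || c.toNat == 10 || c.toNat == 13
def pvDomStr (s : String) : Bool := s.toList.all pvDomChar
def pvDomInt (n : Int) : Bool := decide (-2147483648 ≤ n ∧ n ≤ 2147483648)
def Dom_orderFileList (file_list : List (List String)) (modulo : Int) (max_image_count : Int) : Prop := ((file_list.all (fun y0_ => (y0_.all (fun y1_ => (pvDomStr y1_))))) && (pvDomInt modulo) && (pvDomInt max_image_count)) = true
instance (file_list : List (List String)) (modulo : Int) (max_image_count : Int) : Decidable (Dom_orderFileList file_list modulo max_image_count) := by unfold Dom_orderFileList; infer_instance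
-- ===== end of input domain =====

-- B replaces A's stateful round-robin loop (per-list counters and an if/else on chunk bounds)
-- by a staged pipeline: chunk each sorted sublist, transpose the chunk rows, truncate, flatten.
-- Both Pythons sort the sublists IN PLACE; the equivalence proved here is about the return value.

-- ===== PORT A =====
-- 'set.sort()' sorts in place; for the return value we use sorted copies.
def orderFileList (file_list : List (List String)) (modulo : Int) (max_image_count : Int) : List String :=
  let fl := file_list.map (fun s => PySem.List.sorted s (fun x => x))
  let set_size : List Int := fl.map (fun s => (s.length : Int))
  let set_index : List Int := List.replicate file_list.length modulo
  let bound : Int := min (PySem.Int.floordiv (set_size.foldl (· + ·) 0) modulo)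
                         (PySem.Int.floordiv max_image_count modulo - 1)
  -- inside the loop index ≥ 0 and len(set_size) > 0, so 'index % len(set_size)' is a valid index
  let res := (PySem.List.pyRange 0 bound).foldl
    (fun (st : List Int × List String) (index : Int) =>
      let j := (PySem.Int.mod index (set_size.length : Int)).toNat
      let si := st.1.getD j 0
      let sz := set_size.getD j 0
      let seg := if si < sz
        then PySem.List.slice (fl.getD j []) (some (si - modulo)) (some si)
        else PySem.List.slice (fl.getD j []) (some (si - modulo)) (some sz)
      (st.1.set j (si + modulo), st.2 ++ seg))
    (set_index, [])
  res.2

-- ===== PORT B =====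
def orderFileList_alt (file_list : List (List String)) (modulo : Int) (max_image_count : Int) : List String :=
  let fl := file_list.map (fun s => PySem.List.sorted s (fun x => x))
  let total : Int := file_list.foldl (fun a s => a + (s.length : Int)) 0
  let bound : Int := min (PySem.Int.floordiv total modulo)
                         (PySem.Int.floordiv max_image_count modulo - 1)
  if bound ≤ 0 then []
  else
    let n : Int := (file_list.length : Int)
    let rounds : Int := -(PySem.Int.floordiv (-bound) n)
    let chunk_rows := fl.map (fun s => (List.range rounds.toNat).map
        (fun (k : Nat) => PySem.List.slice s (some ((k : Int) * modulo)) (some (((k : Int) + 1) * modulo))))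
    -- 'zip(*chunk_rows)' flattened column-major (all rows have length rounds)
    let interleaved := (List.range rounds.toNat).flatMap
        (fun c => chunk_rows.map (fun row => row.getD c []))
    (PySem.List.slice interleaved none (some bound)).flatten

-- ===== PRECONDITION & SPEC =====
-- Pre_ excludes exactly modulo = 0, on which A raises ZeroDivisionError (and so does B).
def Pre_orderFileList (file_list : List (List String)) (modulo : Int) (max_image_count : Int) : Prop :=
  modulo ≠ 0
instance (file_list : List (List String)) (modulo : Int) (max_image_count : Int) : Decidable (Pre_orderFileList file_list modulo max_image_count) := by unfold Pre_orderFileList; infer_instance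
def pvWitness_orderFileList : List (List String) × Int × Int := ([["b", "a"], ["c", "d", "e"]], 2, 40)

def Spec_orderFileList (file_list : List (List String)) (modulo : Int) (max_image_count : Int) (out : List String) : Prop := out = orderFileList_alt file_list modulo max_image_count
instance (file_list : List (List String)) (modulo : Int) (max_image_count : Int) (out : List String) : Decidable (Spec_orderFileList file_list modulo max_image_count out) := by unfold Spec_orderFileList; infer_instance

-- ===== CLAIM (what is proved, stated in full; the proofs are below) =====
def Claim_equal_orderFileList : Prop := ∀ (file_list : List (List String)) (modulo : Int) (max_image_count : Int), Dom_orderFileList file_list modulo max_image_count → Pre_orderFileList file_list modulo max_image_count → Spec_orderFileList file_list modulo max_image_count (orderFileList file_list modulo max_image_count)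

-- ===== LEMMAS AND PROOFS =====

-- the chunk appended at iteration m (chunk m/n of list m%n)
def pvSEG (fl : List (List String)) (modulo : Int) (n m : Nat) : List String :=
  PySem.List.slice (fl.getD (m % n) []) (some (((m / n : Nat) : Int) * modulo)) (some ((((m / n : Nat) : Int) + 1) * modulo))

-- the output accumulated after m chunks
def pvOUT (fl : List (List String)) (modulo : Int) (n : Nat) : Nat → List String
  | 0 => []
  | m + 1 => pvOUT fl modulo n m ++ pvSEG fl modulo n m

-- A's set_index after m iterations: entry j holds modulo * (1 + number of visits to j so far)
def pvIDX (modulo : Int) (n m : Nat) : List Int :=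
  (List.range n).map (fun j => modulo * (1 + ((m / n + if j < m % n then 1 else 0 : Nat) : Int)))

theorem pvStepDivMod (n m : Nat) (hn : 0 < n) :
    ((m + 1) % n = m % n + 1 ∧ (m + 1) / n = m / n ∧ m % n + 1 < n) ∨
    ((m + 1) % n = 0 ∧ (m + 1) / n = m / n + 1 ∧ m % n + 1 = n) := by
  have hlt := Nat.mod_lt m hn
  by_cases h : m % n + 1 < n
  · left
    have hmod : (m + 1) % n = m % n + 1 := by
      rw [← Nat.mod_add_mod, Nat.mod_eq_of_lt h]
    refine ⟨hmod, ?_, h⟩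
    have hnd : ¬ n ∣ (m + 1) := by
      intro hd
      have h0 : (m + 1) % n = 0 := (Nat.dvd_iff_mod_eq_zero ..).mp hd
      omega
    rw [Nat.succ_div, if_neg hnd]
    omega
  · right
    have heq : m % n + 1 = n := by omega
    have hmod : (m + 1) % n = 0 := by
      rw [← Nat.mod_add_mod, heq, Nat.mod_self]
    refine ⟨hmod, ?_, heq⟩
    rw [Nat.succ_div, if_pos ((Nat.dvd_iff_mod_eq_zero ..).mpr hmod)]

theorem pvIDX_zero (modulo : Int) (n : Nat) :
    pvIDX modulo n 0 = List.replicate n modulo := by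
  unfold pvIDX
  apply List.ext_getElem <;> simp

theorem pvIDX_getD (modulo : Int) (n m j : Nat) (hj : j < n) :
    (pvIDX modulo n m).getD j 0
      = modulo * (1 + ((m / n + if j < m % n then 1 else 0 : Nat) : Int)) := by
  unfold pvIDX
  rw [List.getD_eq_getElem?_getD, List.getElem?_map, List.getElem?_range hj]
  simp

theorem pvIDX_set (modulo : Int) (n m : Nat) (hn : 0 < n) :
    (pvIDX modulo n m).set (m % n) (modulo * (1 + ((m / n : Nat) : Int)) + modulo)
      = pvIDX modulo n (m + 1) := by
  apply List.ext_getElem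
  · simp [pvIDX]
  · intro j hj hj'
    have hjn : j < n := by simpa [pvIDX] using hj
    rw [List.getElem_set]
    simp only [pvIDX, List.getElem_map, List.getElem_range]
    rcases pvStepDivMod n m hn with ⟨h1, h2, h3⟩ | ⟨h1, h2, h3⟩ <;>
      rw [h1, h2] <;>
      by_cases hje : m % n = j
    · subst hje; rw [if_pos rfl, if_pos (by omega)]; push_cast; ring
    · rw [if_neg hje]
      have : (if j < m % n then 1 else 0) = (if j < m % n + 1 then 1 else 0) := by
        split_ifs <;> omega
      rw [this]
    · subst hje; rw [if_pos rfl, if_neg (by omega)]; push_cast; ring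
    · rw [if_neg hje]
      have h4 : (if j < m % n then 1 else 0) = 1 := by rw [if_pos (by omega)]
      have h5 : (if j < 0 then 1 else 0) = 0 := by rw [if_neg (by omega)]
      rw [h4, h5]

theorem pv_loopA (fl : List (List String)) (modulo : Int) (hm : 0 < modulo) (m : Nat)
    (hn : 0 < fl.length) :
    ((PySem.List.pyRange 0 (m : Int)).foldl
      (fun (st : List Int × List String) (index : Int) =>
        let j := (PySem.Int.mod index ((fl.map (fun s => (s.length : Int))).length : Int)).toNat
        let si := st.1.getD j 0
        let sz := (fl.map (fun s => (s.length : Int))).getD j 0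
        let seg := if si < sz
          then PySem.List.slice (fl.getD j []) (some (si - modulo)) (some si)
          else PySem.List.slice (fl.getD j []) (some (si - modulo)) (some sz)
        (st.1.set j (si + modulo), st.2 ++ seg))
      (pvIDX modulo fl.length 0, []))
    = (pvIDX modulo fl.length m, pvOUT fl modulo fl.length m) := by
  induction m with
  | zero => simp [pvOUT]
  | succ m ih =>
    have hcast : ((m + 1 : Nat) : Int) = (m : Int) + 1 := by push_cast; ring
    rw [hcast, PySem.List.pyRange_one_succ_right (by positivity), List.foldl_append, ih]
    simp only [List.foldl_cons, List.foldl_nil]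
    have hr : m % fl.length < fl.length := Nat.mod_lt _ hn
    rw [List.length_map, PySem.Int.mod_natCast, Int.toNat_natCast,
        pvIDX_getD _ _ _ _ hr]
    simp only [lt_irrefl, if_false, Nat.add_zero]
    have hsz : (List.map (fun s => (s.length : Int)) fl).getD (m % fl.length) 0
        = ((fl.getD (m % fl.length) []).length : Int) := by
      simp [List.getD_eq_getElem?_getD, List.getElem?_map, List.getElem?_eq_getElem hr]
    rw [hsz, pvIDX_set _ _ _ hn]
    refine Prod.ext rfl ?_
    show pvOUT fl modulo fl.length m ++ _ = pvOUT fl modulo fl.length (m + 1)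
    rw [pvOUT]
    congr 1
    have ha : modulo * (1 + ((m / fl.length : Nat) : Int)) - modulo
        = ((m / fl.length : Nat) : Int) * modulo := by ring
    have hb : modulo * (1 + ((m / fl.length : Nat) : Int))
        = (((m / fl.length : Nat) : Int) + 1) * modulo := by ring
    split_ifs with h
    · rw [ha, hb]; rfl
    · rw [ha]
      show PySem.List.slice (fl.getD (m % fl.length) []) _ _ = pvSEG fl modulo fl.length m
      rw [hb] at h
      unfold pvSEG
      have h0a : (0 : Int) ≤ ((m / fl.length : Nat) : Int) * modulo := by positivity
      have h0b : (0 : Int) ≤ ((fl.getD (m % fl.length) []).length : Int) := by positivity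
      have h0c : (0 : Int) ≤ (((m / fl.length : Nat) : Int) + 1) * modulo := by positivity
      rw [PySem.List.slice_toNat _ h0a h0b, PySem.List.slice_toNat _ h0a h0c]
      have hlen : ((fl.getD (m % fl.length) []).length : Int).toNat
          = (fl.getD (m % fl.length) []).length := Int.toNat_natCast _
      have hge : (fl.getD (m % fl.length) []).length
          ≤ ((((m / fl.length : Nat) : Int) + 1) * modulo).toNat := by
        have := Int.toNat_le_toNat (not_lt.mp h)
        omega
      rw [List.take_of_length_le (by rw [List.length_drop, hlen]),
          List.take_of_length_le (by rw [List.length_drop]; omega)]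

-- length of a column-major flattened transpose with rows of equal length
theorem pv_flatMap_length {α : Type} (N : Nat) (g : Nat → List α)
    (hlen : ∀ c, (g c).length = N) (R : Nat) :
    ((List.range R).flatMap g).length = R * N := by
  induction R with
  | zero => simp
  | succ R ih =>
    rw [List.range_succ, List.flatMap_append]
    simp [ih, hlen, Nat.succ_mul]

theorem pv_flatMap_getElem? {α : Type} (N : Nat) (g : Nat → List α)
    (hlen : ∀ c, (g c).length = N) (R i : Nat) (hi : i < R * N) :
    ((List.range R).flatMap g)[i]? = (g (i / N))[i % N]? := by
  induction R with
  | zero => omega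
  | succ R ih =>
    rw [List.range_succ, List.flatMap_append, List.flatMap_singleton]
    by_cases h : i < R * N
    · rw [List.getElem?_append_left (by rw [pv_flatMap_length N g hlen]; exact h)]
      exact ih h
    · have hN : 0 < N := by
        rcases Nat.eq_zero_or_pos N with h0 | h0
        · rw [h0, Nat.mul_zero] at hi; omega
        · exact h0
      rw [List.getElem?_append_right (by rw [pv_flatMap_length N g hlen]; omega)]
      rw [pv_flatMap_length N g hlen]
      have hq : i / N = R := Nat.div_eq_of_lt_le (Nat.le_of_not_lt h) hi
      have h2 := Nat.mod_add_div i N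
      rw [hq] at h2
      have hcomm : N * R = R * N := Nat.mul_comm N R
      have hrm : i % N = i - R * N := by omega
      rw [hq, hrm]

theorem pv_interleaved_flatten (fl : List (List String)) (modulo : Int) (R : Nat)
    (m : Nat) (hm : m ≤ R * fl.length) :
    ((((List.range R).flatMap (fun c =>
        (fl.map (fun s => (List.range R).map
          (fun (k : Nat) => PySem.List.slice s (some ((k : Int) * modulo)) (some (((k : Int) + 1) * modulo))))).map
          (fun row => row.getD c []))).take m).flatten)
      = pvOUT fl modulo fl.length m := by
  induction m with
  | zero => simp [pvOUT]
  | succ m ih =>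
    rw [List.take_add_one, List.flatten_append, ih (by omega)]
    rw [pvOUT]
    congr 1
    have hget := pv_flatMap_getElem? fl.length
      (fun c => (fl.map (fun s => (List.range R).map
          (fun (k : Nat) => PySem.List.slice s (some ((k : Int) * modulo)) (some (((k : Int) + 1) * modulo))))).map
          (fun row => row.getD c []))
      (by intro c; simp) R m (by omega)
    rw [hget]
    have hN : 0 < fl.length := by
      rcases Nat.eq_zero_or_pos fl.length with h0 | h0
      · rw [h0, Nat.mul_zero] at hm; omega
      · exact h0
    have hjn : m % fl.length < fl.length := Nat.mod_lt _ hN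
    have hkR : m / fl.length < R := Nat.div_lt_of_lt_mul (by rw [Nat.mul_comm]; omega)
    rw [List.getElem?_map, List.getElem?_eq_getElem (by simpa using hjn)]
    simp only [Option.map_some, Option.toList_some, List.getElem_map]
    rw [List.getD_eq_getElem?_getD, List.getElem?_map, List.getElem?_range hkR]
    simp only [Option.map_some, Option.getD_some]
    unfold pvSEG
    rw [List.getD_eq_getElem?_getD, List.getElem?_eq_getElem hjn]
    simp

theorem pv_sum_nonneg (l : List (List String)) (a : Int) (ha : 0 ≤ a) :
    0 ≤ l.foldl (fun a s => a + (s.length : Int)) a := by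
  induction l generalizing a with
  | nil => simpa using ha
  | cons x xs ih => exact ih _ (by positivity)

theorem pv_floordiv_nonpos (a b : Int) (ha : 0 ≤ a) (hb : b < 0) :
    PySem.Int.floordiv a b ≤ 0 := by
  have hdm := PySem.Int.floordiv_mul_add_mod a b
  have hr := PySem.Int.mod_neg_bounds a hb
  nlinarith [hdm, hr.1, hr.2]

theorem le_or_lt' (a b : Int) : a ≤ b ∨ b < a := by omega

theorem orderFileList_spec : Claim_equal_orderFileList := by
  intro file_list modulo max_image_count _ hpre
  simp only [Spec_orderFileList, orderFileList, orderFileList_alt]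
  have hflen : (file_list.map (fun s => PySem.List.sorted s (fun x => x))).length
      = file_list.length := List.length_map ..
  have hsum : ((file_list.map (fun s => PySem.List.sorted s (fun x => x))).map
        (fun s => (s.length : Int))).foldl (· + ·) 0
      = file_list.foldl (fun a s => a + (s.length : Int)) 0 := by
    simp [List.foldl_map, PySem.List.length_sorted]
  rw [hsum]
  set fl := file_list.map (fun s => PySem.List.sorted s (fun x => x)) with hfl
  set bound := min (PySem.Int.floordiv (file_list.foldl (fun a s => a + (s.length : Int)) 0) modulo)
      (PySem.Int.floordiv max_image_count modulo - 1) with hbd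
  rcases le_or_lt' bound 0 with hble | hbpos
  · have hnil : PySem.List.pyRange 0 bound = [] := by
      rw [PySem.List.pyRange_one]
      have h0 : (bound - 0).toNat = 0 := by omega
      rw [h0]
      rfl
    rw [hnil, if_pos hble]
    rfl
  · rw [if_neg (by omega)]
    have hS0 : 0 ≤ file_list.foldl (fun a s => a + (s.length : Int)) 0 :=
      pv_sum_nonneg file_list 0 le_rfl
    have hmpos : 0 < modulo := by
      rcases lt_trichotomy modulo 0 with h | h | h
      · have := pv_floordiv_nonpos _ _ hS0 h
        omega
      · exact absurd h hpre
      · exact h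
    have hn : 0 < file_list.length := by
      by_contra h
      have h0 : file_list = [] := List.eq_nil_of_length_eq_zero (by omega)
      subst h0
      have : PySem.Int.floordiv 0 modulo = 0 := by
        rw [PySem.Int.floordiv_eq_ediv_of_pos hmpos, Int.zero_ediv]
      simp only [List.foldl_nil] at hS0 ⊢
      rw [hbd] at hbpos
      simp only [List.foldl_nil] at hbpos
      omega
    -- rounds = ceil(bound / n) ≥ 1 and bound ≤ rounds * n
    set n : Int := (file_list.length : Int) with hnn
    set rounds : Int := -(PySem.Int.floordiv (-bound) n) with hrd
    have hdm := PySem.Int.floordiv_mul_add_mod (-bound) n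
    have hnpos : (0 : Int) < n := by rw [hnn]; exact_mod_cast hn
    have hr0 : 0 ≤ PySem.Int.mod (-bound) n := PySem.Int.mod_nonneg _ hnpos
    have hrlt : PySem.Int.mod (-bound) n < n := PySem.Int.mod_lt _ hnpos
    have hble : bound ≤ rounds * n := by nlinarith
    have hRpos : 0 < rounds := by
      by_contra h
      have h' : rounds ≤ 0 := by omega
      have : rounds * n ≤ 0 := mul_nonpos_of_nonpos_of_nonneg h' (by positivity)
      omega
    have hRcast : ((rounds.toNat : Int)) = rounds := Int.toNat_of_nonneg hRpos.le
    have hmle : bound.toNat ≤ rounds.toNat * fl.length := by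
      have h1 : bound ≤ ((rounds.toNat * fl.length : Nat) : Int) := by
        push_cast
        rw [hRcast, hflen]
        exact hble
      omega
    rw [PySem.List.slice_to _ hbpos.le]
    have hBcast : bound = ((bound.toNat : Nat) : Int) := (Int.toNat_of_nonneg hbpos.le).symm
    rw [pv_interleaved_flatten fl modulo rounds.toNat bound.toNat hmle]
    rw [hBcast, ← hflen, ← pvIDX_zero modulo]
    rw [pv_loopA fl modulo hmpos bound.toNat (by omega)]
    show pvOUT fl modulo fl.length bound.toNat
        = pvOUT fl modulo fl.length ((bound.toNat : Int)).toNat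
    rw [Int.toNat_natCast]
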